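-- pv_equiv track=rewrite | github.com/eliottcassidy2000/math | 04-computation/anti_aut_involution_fast.py | find_any_anti_aut
-- ===== SOURCE A (Python) =====
-- from itertools import permutations
--
-- def find_any_anti_aut(T):
--     """Find any anti-aut of T, or return None."""
--     n = len(T)
--     for perm in permutations(range(n)):
--         ok = True
--         for i in range(n):
--             for j in range(i+1, n):
--                 if T[perm[i]][perm[j]] != (1 - T[i][j]):
--                     ok = False
--                     break
--             if not ok:
--                 break
--         if ok:
--             return perm
--     return None
-- ===== SOURCE B (Python) =====
-- def find_any_anti_aut(T):
--     """Find any anti-aut of T, or return None (backtracking with prefix pruning)."""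
--     n = len(T)
--
--     def extend(prefix, remaining):
--         if not remaining:
--             return tuple(prefix)
--         m = len(prefix)
--         for x in remaining:
--             if all(T[prefix[j]][x] == 1 - T[j][m] for j in range(m)):
--                 res = extend(prefix + [x], [y for y in remaining if y != x])
--                 if res is not None:
--                     return res
--         return None
--
--     return extend([], list(range(n)))
-- ===== Notes on version B (the rewrite author's own statement) =====
-- stated objective: faster
-- what changed: A scans all n! permutations and re-checks every pair for each; B builds the permutation incrementally by backtracking, pruning a partial assignment at the first violated prefix pair, which yields the same lexicographically-first solution.
-- outside the precondition, e.g. on find_any_anti_aut([[1, 0], [0]]): A returns None, B returns None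
import Mathlib
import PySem

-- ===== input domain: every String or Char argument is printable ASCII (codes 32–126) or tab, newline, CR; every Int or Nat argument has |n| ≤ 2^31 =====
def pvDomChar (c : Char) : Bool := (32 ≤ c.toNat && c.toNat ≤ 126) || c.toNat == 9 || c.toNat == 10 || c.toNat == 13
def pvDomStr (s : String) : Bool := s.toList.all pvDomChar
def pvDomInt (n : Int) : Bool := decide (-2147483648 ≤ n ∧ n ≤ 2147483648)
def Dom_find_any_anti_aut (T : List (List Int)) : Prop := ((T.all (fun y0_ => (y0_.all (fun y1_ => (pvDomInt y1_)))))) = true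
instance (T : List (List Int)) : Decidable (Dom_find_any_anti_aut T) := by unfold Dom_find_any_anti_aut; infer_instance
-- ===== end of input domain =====

-- B replaces A's brute-force scan of all n! permutations by incremental backtracking
-- that prunes a partial assignment at the first violated prefix pair (objective: faster).


-- ===== PORT A =====
-- T[a][b] for in-range nonnegative indices (all accesses are in range under Pre_)
def pvGet2 (T : List (List Int)) (a b : Nat) : Int := (T.getD a []).getD b 0

-- the double loop over i, j in range(i+1, n) with breaks; breaks do not change the boolean
def pvOk (T : List (List Int)) (n : Nat) (perm : List Nat) : Bool :=
  (List.range n).all fun i =>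
    (List.range' (i+1) (n - (i+1))).all fun j =>
      pvGet2 T (perm.getD i 0) (perm.getD j 0) == 1 - pvGet2 T i j

-- itertools.permutations(range(n)): lexicographic order, picking each remaining element in turn
def pvPerms : Nat → List Nat → List (List Nat)
  | 0, _ => [[]]
  | k+1, l => l.flatMap fun x => (pvPerms k (l.erase x)).map (x :: ·)

def find_any_anti_aut (T : List (List Int)) : Option (List Int) :=
  ((pvPerms T.length (List.range T.length)).find? (pvOk T T.length)).map (List.map Int.ofNat)

-- ===== PORT B =====
-- the prefix-consistency test: all pairs (j, m) with j < m = len(prefix)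
def pvStepOk (T : List (List Int)) (pref : List Nat) (x : Nat) : Bool :=
  (List.range pref.length).all fun j =>
    pvGet2 T (pref.getD j 0) x == 1 - pvGet2 T j pref.length

-- extend(prefix, remaining); fuel = length of remaining
def pvSearch (T : List (List Int)) : Nat → List Nat → List Nat → Option (List Nat)
  | 0, pref, _ => some pref
  | k+1, pref, rem =>
      rem.findSome? fun x =>
        if pvStepOk T pref x then pvSearch T k (pref ++ [x]) (rem.erase x) else none

def find_any_anti_aut_alt (T : List (List Int)) : Option (List Int) :=
  (pvSearch T T.length [] (List.range T.length)).map (List.map Int.ofNat)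

-- ===== PRECONDITION & SPEC =====
-- Pre_ excludes ragged inputs with n ≥ 2 (some row shorter than len(T)), on which the
-- Pythons may raise IndexError or return a value depending on which out-of-range access
-- comes first; for n ≤ 1 no entry is ever read, so those inputs stay inside.
def Pre_find_any_anti_aut (T : List (List Int)) : Prop :=
  T.length ≤ 1 ∨ ∀ row ∈ T, T.length ≤ row.length
instance (T : List (List Int)) : Decidable (Pre_find_any_anti_aut T) := by
  unfold Pre_find_any_anti_aut; infer_instance

def pvWitness_find_any_anti_aut : List (List Int) := [[0, 1], [0, 0]]

def Spec_find_any_anti_aut (T : List (List Int)) (out : Option (List Int)) : Prop := out = find_any_anti_aut_alt T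
instance (T : List (List Int)) (out : Option (List Int)) : Decidable (Spec_find_any_anti_aut T out) := by unfold Spec_find_any_anti_aut; infer_instance

-- ===== CLAIM (what is proved, stated in full; the proofs are below) =====
def Claim_equal_find_any_anti_aut : Prop := ∀ (T : List (List Int)), Dom_find_any_anti_aut T → Pre_find_any_anti_aut T → Spec_find_any_anti_aut T (find_any_anti_aut T)

-- ===== LEMMAS AND PROOFS =====

-- Prop characterisation of the full check
theorem pvOk_iff (T : List (List Int)) (n : Nat) (l : List Nat) :
    pvOk T n l = true ↔
      ∀ i j, i < j → j < n → pvGet2 T (l.getD i 0) (l.getD j 0) = 1 - pvGet2 T i j := by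
  simp only [pvOk, List.all_eq_true, List.mem_range, List.mem_range'_1, beq_iff_eq]
  constructor
  · intro h i j hij hjn
    exact h i (lt_trans hij hjn) j ⟨hij, by omega⟩
  · intro h i hi j hj
    exact h i j hj.1 (by omega)

theorem pvStepOk_iff (T : List (List Int)) (pref : List Nat) (x : Nat) :
    pvStepOk T pref x = true ↔
      ∀ j, j < pref.length → pvGet2 T (pref.getD j 0) x = 1 - pvGet2 T j pref.length := by
  simp [pvStepOk, List.all_eq_true, List.mem_range, beq_iff_eq]

theorem getD_append_lt {l l' : List Nat} {i : Nat} (h : i < l.length) :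
    (l ++ l').getD i 0 = l.getD i 0 := by
  simp [List.getD_eq_getElem?_getD, List.getElem?_append_left h]

-- restriction to a prefix
theorem pvOk_restrict (T : List (List Int)) {n : Nat} {pref rest : List Nat}
    (hn : pref.length ≤ n) (h : pvOk T n (pref ++ rest) = true) :
    pvOk T pref.length pref = true := by
  rw [pvOk_iff] at h ⊢
  intro i j hij hj
  have := h i j hij (lt_of_lt_of_le hj hn)
  rwa [getD_append_lt (lt_trans hij hj), getD_append_lt hj] at this

-- one extension step
theorem pvOk_snoc (T : List (List Int)) (pref : List Nat) (x : Nat) :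
    pvOk T (pref.length + 1) (pref ++ [x]) = (pvOk T pref.length pref && pvStepOk T pref x) := by
  rcases h : pvOk T pref.length pref && pvStepOk T pref x with _ | _
  · rcases Bool.and_eq_false_iff.mp h with h' | h'
    · apply Bool.eq_false_iff.mpr; intro hc
      exact Bool.eq_false_iff.mp h' (pvOk_restrict T (Nat.le_succ _) hc)
    · apply Bool.eq_false_iff.mpr; intro hc
      apply Bool.eq_false_iff.mp h'
      rw [pvStepOk_iff]
      intro j hj
      have := (pvOk_iff ..).mp hc j pref.length hj (Nat.lt_succ_self _)
      rwa [getD_append_lt hj,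
        show (pref ++ [x]).getD pref.length 0 = x by
          simp [List.getD_eq_getElem?_getD]] at this
  · obtain ⟨h1, h2⟩ := Bool.and_eq_true_iff.mp h
    rw [pvOk_iff]
    intro i j hij hj
    rcases Nat.lt_or_ge j pref.length with hj' | hj'
    · rw [getD_append_lt (lt_trans hij hj'), getD_append_lt hj']
      exact (pvOk_iff ..).mp h1 i j hij hj'
    · have hjm : j = pref.length := by omega
      subst hjm
      rw [getD_append_lt hij,
        show (pref ++ [x]).getD pref.length 0 = x by
          simp [List.getD_eq_getElem?_getD]]
      exact (pvStepOk_iff ..).mp h2 i hij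

theorem find?_flatMap {α β : Type} (l : List α) (f : α → List β) (p : β → Bool) :
    (l.flatMap f).find? p = l.findSome? fun a => (f a).find? p := by
  induction l with
  | nil => rfl
  | cons a l ih =>
    rw [List.flatMap_cons, List.find?_append, List.findSome?_cons]
    rcases h : (f a).find? p with _ | b <;> simp [ih]

theorem findSome?_congr_mem {α β : Type} {l : List α} {f g : α → Option β}
    (h : ∀ a ∈ l, f a = g a) : l.findSome? f = l.findSome? g := by
  induction l with
  | nil => rfl
  | cons a l ih =>
    rw [List.findSome?_cons, List.findSome?_cons, h a (List.mem_cons_self ..),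
      ih fun a ha => h a (List.mem_cons_of_mem _ ha)]

-- the backtracking search explores exactly the completions of the prefix, in order
theorem pvSearch_eq (T : List (List Int)) :
    ∀ (k : Nat) (pref rem : List Nat), rem.length = k → pref.length + k = T.length →
      pvOk T pref.length pref = true →
      ((pvPerms k rem).map (pref ++ ·)).find? (pvOk T T.length) = pvSearch T k pref rem := by
  intro k
  induction k with
  | zero =>
    intro pref rem _ hn hok
    simp only [pvPerms, pvSearch, List.map_cons, List.map_nil, List.append_nil, List.find?]
    rw [show pref.length = T.length from by omega] at hok
    simp [hok]
  | succ k ih =>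
    intro pref rem hlen hn hok
    simp only [pvPerms, pvSearch]
    rw [List.map_flatMap, find?_flatMap]
    apply findSome?_congr_mem
    intro x hx
    rw [List.map_map]
    have hxmap : ((fun l => pref ++ l) ∘ (x :: ·)) = fun l => (pref ++ [x]) ++ l := by
      funext l; simp
    rw [hxmap]
    have herase : (rem.erase x).length = k := by
      simp [List.length_erase_of_mem hx, hlen]
    rcases hstep : pvStepOk T pref x with _ | _
    · -- pruned branch: every completion fails the full check
      rw [if_neg (by simp), List.find?_eq_none]
      intro y hy
      obtain ⟨q, _, rfl⟩ := List.mem_map.mp hy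
      intro hc
      have hle : (pref ++ [x]).length ≤ T.length := by simp; omega
      have := pvOk_restrict T hle hc
      rw [List.length_append, List.length_cons, List.length_nil, pvOk_snoc] at this
      rw [Bool.and_eq_true_iff] at this
      exact Bool.eq_false_iff.mp hstep this.2
    · -- consistent branch: recurse
      rw [if_pos rfl]
      apply ih (pref ++ [x]) (rem.erase x) herase (by simp; omega)
      rw [List.length_append, List.length_cons, List.length_nil, pvOk_snoc,
        Bool.and_eq_true_iff]
      exact ⟨hok, hstep⟩

-- ===== VERDICT (by name: the statement is the Claim_ definition above) =====
theorem find_any_anti_aut_spec : Claim_equal_find_any_anti_aut := by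
  intro T _ _
  unfold Spec_find_any_anti_aut find_any_anti_aut find_any_anti_aut_alt
  have h := pvSearch_eq T T.length [] (List.range T.length)
    (List.length_range ..) (by simp) (by simp [pvOk])
  rw [show ((pvPerms T.length (List.range T.length)).map (fun l => [] ++ l))
        = pvPerms T.length (List.range T.length) from by simp] at h
  rw [h]
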